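-- pv_equiv track=rewrite | github.com/MrBrantCode/unitest_baseline | mut_generate/mist_train_cf/cf_16173/solution.py | create_palindrome
-- ===== SOURCE A (Python) =====
-- def create_palindrome(s):
--     """
--     This function takes a string of characters as input and returns a palindrome string.
--     It only considers lowercase alphabets and ignores special characters and numbers.
--
--     Parameters:
--     s (str): The input string
--
--     Returns:
--     str: A palindrome string
--     """
--     palindrome = ''
--     for ch in s:
--         if ch.isalpha():
--             palindrome = ch.lower() + palindrome
--     left, right = 0, len(palindrome) - 1
--     while left < right:
--         if palindrome[left] == palindrome[right]:
--             left += 1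
--             right -= 1
--         else:
--             break
--     if left >= right:
--         return palindrome + palindrome[::-1]
-- ===== SOURCE B (Python) =====
-- def create_palindrome(s):
--     t = ''.join(c.lower() for c in s if c.isalpha())
--     if t == t[::-1]:
--         return t + t
-- ===== Notes on version B (the rewrite author's own statement) =====
-- stated objective: simpler
-- what changed: B builds the filtered lowercase string forward with a join comprehension and tests palindromicity by one reversed-slice comparison t == t[::-1], instead of A's reverse-prepend accumulation followed by a two-pointer early-break scan.
import Mathlib
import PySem

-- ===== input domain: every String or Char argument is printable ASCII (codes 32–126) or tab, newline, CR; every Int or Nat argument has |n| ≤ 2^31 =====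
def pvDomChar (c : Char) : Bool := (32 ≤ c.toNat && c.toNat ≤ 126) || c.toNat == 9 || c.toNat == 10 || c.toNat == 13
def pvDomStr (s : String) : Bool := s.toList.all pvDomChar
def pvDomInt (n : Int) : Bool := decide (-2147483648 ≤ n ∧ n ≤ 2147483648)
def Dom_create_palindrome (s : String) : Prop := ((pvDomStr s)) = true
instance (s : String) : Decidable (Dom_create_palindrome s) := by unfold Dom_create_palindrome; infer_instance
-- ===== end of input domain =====

-- B builds the filtered lowercase string forward and tests palindromicity with one
-- reversed-slice comparison, instead of A's reverse-prepend build plus two-pointer scan (simpler).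

-- ===== PORT A =====
-- A's while-loop: two pointers moving inward, stopping at the first mismatch.
-- Counters are Nat: Python's right = len-1 is negative only for the empty string,
-- where both versions skip the loop and the final 'left >= right' test succeeds alike.
def cpLoop (p : List Char) (l r : Nat) : Nat × Nat :=
  if h : l < r then
    if p[l]? = p[r]? then cpLoop p (l + 1) (r - 1) else (l, r)
  else (l, r)
termination_by r - l
decreasing_by omega

def create_palindrome (s : String) : Option String :=
  let palindrome := s.toList.foldl
    (fun acc ch => if PySem.Chars.isalpha ch then PySem.Chars.lowerChar ch :: acc else acc) []
  let lr := cpLoop palindrome 0 (palindrome.length - 1)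
  if lr.2 ≤ lr.1 then
    some (String.ofList (palindrome ++ (PySem.List.slice? palindrome none none (-1)).getD []))
  else none

-- ===== PORT B =====
def create_palindrome_alt (s : String) : Option String :=
  let t := (s.toList.filter PySem.Chars.isalpha).map PySem.Chars.lowerChar
  if t = (PySem.List.slice? t none none (-1)).getD [] then some (String.ofList (t ++ t))
  else none

-- ===== PRECONDITION & SPEC =====
def Spec_create_palindrome (s : String) (out : Option String) : Prop := out = create_palindrome_alt s
instance (s : String) (out : Option String) : Decidable (Spec_create_palindrome s out) := by unfold Spec_create_palindrome; infer_instance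

-- ===== CLAIM (what is proved, stated in full; the proofs are below) =====
def Claim_equal_create_palindrome : Prop := ∀ (s : String), Dom_create_palindrome s → Spec_create_palindrome s (create_palindrome s)

-- ===== LEMMAS AND PROOFS =====

-- A's accumulation is the reverse of B's forward build.
theorem cp_foldl_prepend (xs acc : List Char) :
    xs.foldl (fun acc ch => if PySem.Chars.isalpha ch then PySem.Chars.lowerChar ch :: acc else acc) acc
      = ((xs.filter PySem.Chars.isalpha).map PySem.Chars.lowerChar).reverse ++ acc := by
  induction xs generalizing acc with
  | nil => simp
  | cons x xs ih =>
    by_cases h : PySem.Chars.isalpha x <;> simp [List.foldl_cons, h, ih]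

-- invariant meaning of the two-pointer state
def cpPal (p : List Char) (l r : Nat) : Prop := ∀ i, l ≤ i → i ≤ r → p[i]? = p[l + r - i]?

theorem cpPal_trivial (p : List Char) {l r : Nat} (h : r ≤ l) : cpPal p l r := by
  intro i hl hr
  have e : l + r - i = i := by omega
  rw [e]

theorem cpPal_step (p : List Char) {l r : Nat} (hlr : l < r) (heq : p[l]? = p[r]?) :
    cpPal p (l + 1) (r - 1) ↔ cpPal p l r := by
  constructor
  · intro h i hl hr
    rcases Nat.lt_or_ge i (l + 1) with hi | hi
    · have : i = l := by omega
      subst this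
      have : i + r - i = r := by omega
      rw [this]; exact heq
    · rcases Nat.lt_or_ge (r - 1) i with hi2 | hi2
      · have : i = r := by omega
        subst this
        have : l + i - i = l := by omega
        rw [this]; exact heq.symm
      · have := h i hi hi2
        have e : l + 1 + (r - 1) - i = l + r - i := by omega
        rwa [e] at this
  · intro h i hl hr
    have := h i (by omega) (by omega)
    have e : l + r - i = l + 1 + (r - 1) - i := by omega
    rwa [e] at this

theorem cpLoop_spec (p : List Char) : ∀ n l r, r - l ≤ n →
    (((cpLoop p l r).2 ≤ (cpLoop p l r).1) ↔ cpPal p l r) := by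
  intro n
  induction n with
  | zero =>
    intro l r h
    have hlr : ¬ l < r := by omega
    rw [cpLoop]; simp only [hlr, dite_false]
    exact ⟨fun _ => cpPal_trivial p (by omega), fun _ => by omega⟩
  | succ n ih =>
    intro l r h
    rw [cpLoop]
    by_cases hlr : l < r
    · simp only [hlr, dite_true]
      by_cases heq : p[l]? = p[r]?
      · simp only [heq, if_true]
        rw [ih (l + 1) (r - 1) (by omega)]
        exact cpPal_step p hlr heq
      · simp only [heq, if_false]
        constructor
        · intro hle; omega
        · intro hpal
          exfalso; apply heq
          have := hpal l (le_refl l) (by omega)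
          have e : l + r - l = r := by omega
          rwa [e] at this
    · simp only [hlr, dite_false]
      exact ⟨fun _ => cpPal_trivial p (by omega), fun _ => by omega⟩

theorem cpPal_iff_rev (p : List Char) : cpPal p 0 (p.length - 1) ↔ p.reverse = p := by
  constructor
  · intro h
    apply List.ext_getElem?
    intro i
    by_cases hi : i < p.length
    · rw [List.getElem?_reverse (by simpa using hi)]
      have := h i (by omega) (by omega)
      have e : 0 + (p.length - 1) - i = p.length - 1 - i := by omega
      rw [e] at this
      exact this.symm
    · rw [List.getElem?_eq_none (by simp only [List.length_reverse]; omega),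
        List.getElem?_eq_none (by omega)]
  · intro h i h0 hi
    by_cases hlen : i < p.length
    · have := List.getElem?_reverse (l := p) (i := i) (by simpa using hlen)
      rw [h] at this
      have e : 0 + (p.length - 1) - i = p.length - 1 - i := by omega
      rw [e, ← this]
    · have hz : p.length = 0 := by omega
      have : i = 0 := by omega
      subst this
      have e : 0 + (p.length - 1) - 0 = 0 := by omega
      rw [e]

theorem create_palindrome_eq_alt (s : String) : create_palindrome s = create_palindrome_alt s := by
  unfold create_palindrome create_palindrome_alt
  simp only [cp_foldl_prepend, List.append_nil, PySem.List.slice?_none_none_neg_one,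
    Option.getD_some]
  set t := (s.toList.filter PySem.Chars.isalpha).map PySem.Chars.lowerChar with ht
  have hcond : ((cpLoop t.reverse 0 (t.reverse.length - 1)).2 ≤ (cpLoop t.reverse 0 (t.reverse.length - 1)).1)
      ↔ t.reverse.reverse = t.reverse := by
    rw [cpLoop_spec t.reverse (t.reverse.length - 1) 0 (t.reverse.length - 1) (by omega)]
    exact cpPal_iff_rev t.reverse
  by_cases hp : t = t.reverse
  · have hA : (cpLoop t.reverse 0 (t.reverse.length - 1)).2 ≤ (cpLoop t.reverse 0 (t.reverse.length - 1)).1 := by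
      rw [hcond, List.reverse_reverse]
      exact hp
    rw [if_pos hA, if_pos hp, List.reverse_reverse, ← hp]
  · have hA : ¬ (cpLoop t.reverse 0 (t.reverse.length - 1)).2 ≤ (cpLoop t.reverse 0 (t.reverse.length - 1)).1 := by
      rw [hcond, List.reverse_reverse]
      exact fun he => hp he
    rw [if_neg hA, if_neg hp]

-- ===== VERDICT (by name: the statement is the Claim_ definition above) =====
theorem create_palindrome_spec : Claim_equal_create_palindrome := by
  intro s _
  unfold Spec_create_palindrome
  exact create_palindrome_eq_alt s
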